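-- pv_equiv track=rewrite | github.com/usagi-epta/ragnar | display.py | get_wifi_wave_count
-- ===== SOURCE A (Python) =====
-- def get_wifi_wave_count(quality):
--     """Translate a 0-100 quality value into 0-4 wave arcs."""
--     if quality is None:
--         return 0
--
--     thresholds = [8, 28, 52, 70]
--     waves = 0
--     for threshold in thresholds:
--         if quality >= threshold:
--             waves += 1
--     return waves
-- ===== SOURCE B (Python) =====
-- import bisect
--
-- def get_wifi_wave_count(quality):
--     """Translate a 0-100 quality value into 0-4 wave arcs."""
--     if quality is None:
--         return 0
--     return bisect.bisect_right([8, 28, 52, 70], quality)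
-- ===== Notes on version B (the rewrite author's own statement) =====
-- stated objective: idiomatic
-- what changed: Replaces the per-threshold counting loop with a binary search (bisect.bisect_right) over the sorted threshold list, using that the count of thresholds <= quality equals the insertion index.
import Mathlib
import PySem

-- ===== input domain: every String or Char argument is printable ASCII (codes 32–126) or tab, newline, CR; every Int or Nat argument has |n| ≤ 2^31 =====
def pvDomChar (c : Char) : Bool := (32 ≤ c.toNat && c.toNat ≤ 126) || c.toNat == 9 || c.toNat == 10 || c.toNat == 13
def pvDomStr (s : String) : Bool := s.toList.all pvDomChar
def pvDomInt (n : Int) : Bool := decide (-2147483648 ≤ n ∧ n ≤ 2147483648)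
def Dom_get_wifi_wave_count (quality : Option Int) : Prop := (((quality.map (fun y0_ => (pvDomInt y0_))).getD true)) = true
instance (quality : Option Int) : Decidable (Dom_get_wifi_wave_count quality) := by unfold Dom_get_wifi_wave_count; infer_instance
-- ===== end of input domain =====

-- B replaces the linear threshold-counting loop with a binary search (bisect_right) over the sorted thresholds; idiomatic, same result.
-- ===== PORT A =====
-- Port of A: count thresholds with quality >= threshold via a fold over the list.
def get_wifi_wave_count (quality : Option Int) : Int :=
  match quality with
  | none => 0
  | some q =>
    let thresholds : List Int := [8, 28, 52, 70]
    thresholds.foldl (fun waves threshold => if q ≥ threshold then waves + 1 else waves) 0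

-- ===== PORT B =====
-- B: bisect.bisect_right ported as the standard binary search (lo/hi halving).
def bisectRight (a : List Int) (x : Int) (lo hi : Nat) : Nat :=
  if _h : lo < hi then
    let mid := (lo + hi) / 2
    if x < a.getD mid 0 then bisectRight a x lo mid
    else bisectRight a x (mid + 1) hi
  else lo
termination_by hi - lo
decreasing_by all_goals omega

def get_wifi_wave_count_alt (quality : Option Int) : Int :=
  match quality with
  | none => 0
  | some q => (bisectRight [8, 28, 52, 70] q 0 4 : Nat)

-- ===== PRECONDITION & SPEC =====
def Spec_get_wifi_wave_count (quality : Option Int) (out : Int) : Prop := out = get_wifi_wave_count_alt quality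
instance (quality : Option Int) (out : Int) : Decidable (Spec_get_wifi_wave_count quality out) := by unfold Spec_get_wifi_wave_count; infer_instance

-- ===== CLAIM (what is proved, stated in full; the proofs are below) =====
def Claim_equal_get_wifi_wave_count : Prop := ∀ (quality : Option Int), Dom_get_wifi_wave_count quality → Spec_get_wifi_wave_count quality (get_wifi_wave_count quality)

-- ===== LEMMAS AND PROOFS =====

-- ===== VERDICT (by name: the statement is the Claim_ definition above) =====
theorem get_wifi_wave_count_spec : Claim_equal_get_wifi_wave_count := by
  intro quality _
  unfold Spec_get_wifi_wave_count
  cases quality with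
  | none => rfl
  | some q =>
    simp only [get_wifi_wave_count, get_wifi_wave_count_alt, List.foldl]
    rcases lt_or_ge q 8 with h1 | h1 <;>
    rcases lt_or_ge q 28 with h2 | h2 <;>
    rcases lt_or_ge q 52 with h3 | h3 <;>
    rcases lt_or_ge q 70 with h4 | h4 <;>
    first
    | omega
    | (repeat (first | omega | (unfold bisectRight; simp only [List.getD]; norm_num)))
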